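-- pv_equiv track=rewrite | github.com/Mjvolk3/torchcell | experiments/010-kuzmin-tmi/scripts/select_12_and_24_genes_top_triples.py | compute_doubles_metrics
-- ===== SOURCE A (Python) =====
-- import math
--
-- def compute_doubles_metrics(
--     selected_genes: list[str], sameith_genes: set[str]
-- ) -> tuple[int, int, int]:
--     """
--     Compute metrics about double mutants needed for a gene panel.
--
--     A "sameith double" is a pair where BOTH genes are in sameith_genes,
--     meaning published gene expression data exists for that pair.
--
--     Args:
--         selected_genes: List of selected gene names
--         sameith_genes: Set of genes with existing Sameith doubles
--
--     Returns:
--         Tuple of (total_doubles, sameith_overlap, new_doubles_needed)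
--     """
--     from itertools import combinations
--
--     S = set(selected_genes)
--     total_doubles = math.comb(len(S), 2)
--
--     # Count pairs where both genes are in sameith
--     sameith_overlap = 0
--     for g1, g2 in combinations(S, 2):
--         if g1 in sameith_genes and g2 in sameith_genes:
--             sameith_overlap += 1
--
--     new_doubles_needed = total_doubles - sameith_overlap
--
--     return total_doubles, sameith_overlap, new_doubles_needed
-- ===== SOURCE B (Python) =====
-- def compute_doubles_metrics(
--     selected_genes: list[str], sameith_genes: set[str]
-- ) -> tuple[int, int, int]:
--     """Closed-form re-implementation: overlap = C(|S ∩ sameith|, 2), no pair loop."""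
--     S = set(selected_genes)
--     n = len(S)
--     k = len(S & set(sameith_genes))
--     total = n * (n - 1) // 2
--     overlap = k * (k - 1) // 2
--     return total, overlap, total - overlap
-- ===== Notes on version B (the rewrite author's own statement) =====
-- stated objective: faster
-- what changed: Replaces the O(n^2) loop over all pairs with the closed form C(k,2) where k = |set(selected_genes) ∩ sameith_genes|, and computes total as n(n-1)//2.
import Mathlib
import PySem

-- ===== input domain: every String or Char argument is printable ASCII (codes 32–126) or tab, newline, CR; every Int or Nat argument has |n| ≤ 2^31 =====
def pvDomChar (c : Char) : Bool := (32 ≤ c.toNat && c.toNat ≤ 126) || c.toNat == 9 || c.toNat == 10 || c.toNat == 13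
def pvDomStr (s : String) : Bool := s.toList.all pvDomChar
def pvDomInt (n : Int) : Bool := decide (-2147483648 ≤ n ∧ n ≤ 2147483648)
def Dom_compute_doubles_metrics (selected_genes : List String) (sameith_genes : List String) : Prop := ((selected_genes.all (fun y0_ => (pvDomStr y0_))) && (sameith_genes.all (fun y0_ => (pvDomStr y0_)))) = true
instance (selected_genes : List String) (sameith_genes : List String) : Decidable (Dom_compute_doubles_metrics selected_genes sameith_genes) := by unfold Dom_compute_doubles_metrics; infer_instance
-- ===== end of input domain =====

-- ===== PORT A =====
-- Port of A: quadratic loop over all 2-combinations of the deduplicated selection.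
def compute_doubles_metrics (selected_genes : List String) (sameith_genes : List String) : Int × Int × Int :=
  let S := PySem.Set.ofList selected_genes
  let total : Int := (Nat.choose S.length 2 : Nat)
  let sameith_overlap : Int :=
    (PySem.List.combinations S 2).foldl
      (fun acc c =>
        if (match c with
            | [g1, g2] => sameith_genes.contains g1 && sameith_genes.contains g2
            | _ => false)
        then acc + 1 else acc) 0
  (total, sameith_overlap, total - sameith_overlap)

-- ===== PORT B =====
-- Port of B: closed form, overlap = C(k,2) with k = |S ∩ sameith|; no pair enumeration.
def compute_doubles_metrics_alt (selected_genes : List String) (sameith_genes : List String) : Int × Int × Int :=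
  let S := PySem.Set.ofList selected_genes
  let n : Int := (S.length : Nat)
  let k : Int := PySem.Set.len (PySem.Set.inter S (PySem.Set.ofList sameith_genes))
  let total := PySem.Int.floordiv (n * (n - 1)) 2
  let overlap := PySem.Int.floordiv (k * (k - 1)) 2
  (total, overlap, total - overlap)

-- ===== PRECONDITION & SPEC =====
def Spec_compute_doubles_metrics (selected_genes : List String) (sameith_genes : List String) (out : Int × Int × Int) : Prop := out = compute_doubles_metrics_alt selected_genes sameith_genes
instance (selected_genes : List String) (sameith_genes : List String) (out : Int × Int × Int) : Decidable (Spec_compute_doubles_metrics selected_genes sameith_genes out) := by unfold Spec_compute_doubles_metrics; infer_instance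

-- ===== CLAIM (what is proved, stated in full; the proofs are below) =====
def Claim_equal_compute_doubles_metrics : Prop := ∀ (selected_genes : List String) (sameith_genes : List String), Dom_compute_doubles_metrics selected_genes sameith_genes → Spec_compute_doubles_metrics selected_genes sameith_genes (compute_doubles_metrics selected_genes sameith_genes)

-- ===== LEMMAS AND PROOFS =====

-- Counting 2-combinations whose two members both satisfy p is C(countP p l, 2).
theorem count_pairs_both (p : String → Bool) : ∀ l : List String,
    (PySem.List.combinations l 2).countP
      (fun c => match c with | [g1, g2] => p g1 && p g2 | _ => false)
    = Nat.choose (l.countP p) 2 := by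
  intro l
  induction l with
  | nil => simp [PySem.List.combinations_nil_succ]
  | cons h t ih =>
    rw [PySem.List.combinations_cons_succ, PySem.List.combinations_one,
        List.countP_append, List.map_map, List.countP_map, List.countP_cons, ih]
    have e : ((fun c => match c with | [g1, g2] => p g1 && p g2 | _ => false)
        ∘ (fun c => h :: c) ∘ fun x => [x]) = fun x => p h && p x := rfl
    by_cases hp : p h = true
    · simp only [e, hp, Bool.true_and, if_true]
      rw [Nat.choose_succ_succ, Nat.choose_one_right]
    · have hp' : p h = false := by simpa using hp
      simp [e, hp']

-- C(m,2) cast to Int is the Python floor division m*(m-1)//2.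
theorem choose_two_int (m : Nat) :
    ((Nat.choose m 2 : Nat) : Int) = PySem.Int.floordiv ((m : Int) * ((m : Int) - 1)) 2 := by
  rw [PySem.Int.floordiv_eq_ediv_of_pos (by norm_num)]
  cases m with
  | zero => decide
  | succ m =>
    rw [Nat.choose_two_right]
    have h1 : ((m + 1) * (m + 1 - 1) / 2 : Nat) = ((m + 1) * m / 2 : Nat) := by simp
    rw [h1, Int.natCast_ediv]
    push_cast
    ring_nf

-- |S ∩ set(sameith)| = countP (sameith.contains) S.
theorem inter_len (S sameith : List String) :
    PySem.Set.len (PySem.Set.inter S (PySem.Set.ofList sameith))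
      = (S.countP (fun g => sameith.contains g) : Nat) := by
  simp only [PySem.Set.len, PySem.Set.inter, ← List.countP_eq_length_filter]
  congr 1
  apply List.countP_congr
  intro a _
  simp [List.contains_eq_mem, PySem.Set.mem_ofList]

-- ===== VERDICT (by name: the statement is the Claim_ definition above) =====
theorem compute_doubles_metrics_spec : Claim_equal_compute_doubles_metrics := by
  intro sel same _
  unfold Spec_compute_doubles_metrics compute_doubles_metrics compute_doubles_metrics_alt
  simp only [PySem.List.foldl_if_add_one, count_pairs_both, inter_len, zero_add,
    choose_two_int]
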